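-- pv_equiv track=rewrite | github.com/Precision577/VPN-Docking-System-with-Squid-Proxy-and-Real-Time-Dashboard | build_vpn_nodes.py | map_nodes
-- ===== SOURCE A (Python) =====
-- def map_nodes(pairs):
--     """
--     Ensure that Node 1 is UDP and Node 2 is TCP, then Node 3 is UDP and Node 4 is TCP, and so on.
--     """
--     node_map = []
--
--     # For each pair, assign the first node to UDP and the second to TCP
--     for i, (udp_file, tcp_file) in enumerate(pairs):
--         udp_node = i * 2 + 1  # Node 1, Node 3, etc. (Odd-numbered nodes for UDP)
--         tcp_node = i * 2 + 2  # Node 2, Node 4, etc. (Even-numbered nodes for TCP)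
--
--         # Append the nodes with correct pairing: UDP first, then TCP
--         node_map.append((udp_node, "udp", udp_file))  # UDP is always odd-numbered
--         node_map.append((tcp_node, "tcp", tcp_file))  # TCP is always even-numbered
--
--     return node_map
-- ===== SOURCE B (Python) =====
-- def map_nodes(pairs):
--     """
--     Ensure that Node 1 is UDP and Node 2 is TCP, then Node 3 is UDP and Node 4 is TCP, and so on.
--     """
--     # Structural recursion carrying the next free node number instead of a loop
--     # with index arithmetic: each pair consumes two consecutive node numbers.
--     def go(rest, n):
--         if not rest:
--             return []
--         (udp_file, tcp_file) = rest[0]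
--         return [(n, "udp", udp_file), (n + 1, "tcp", tcp_file)] + go(rest[1:], n + 2)
--     return go(list(pairs), 1)
-- ===== Notes on version B (the rewrite author's own statement) =====
-- stated objective: alternative
-- what changed: B replaces A's enumerate loop with index arithmetic (i*2+1, i*2+2) and in-place appends by a structural recursion that threads a next-free-node counter and builds the result front-to-back by list concatenation; no enumeration index exists in B.
import Mathlib
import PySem

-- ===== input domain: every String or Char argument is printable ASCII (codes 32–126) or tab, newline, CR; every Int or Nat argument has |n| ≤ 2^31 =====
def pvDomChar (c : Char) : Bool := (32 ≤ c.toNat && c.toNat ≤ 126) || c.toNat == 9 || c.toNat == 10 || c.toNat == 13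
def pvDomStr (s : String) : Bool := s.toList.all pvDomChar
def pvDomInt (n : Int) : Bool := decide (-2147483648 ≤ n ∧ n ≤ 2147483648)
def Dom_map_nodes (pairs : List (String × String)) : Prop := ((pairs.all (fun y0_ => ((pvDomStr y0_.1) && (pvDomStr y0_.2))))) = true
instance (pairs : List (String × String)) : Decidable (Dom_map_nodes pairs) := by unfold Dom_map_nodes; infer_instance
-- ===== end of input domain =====

-- B replaces A's enumerate loop with index arithmetic by a structural recursion that
-- threads a next-free-node counter; alternative decomposition, same result.

-- ===== PORT A =====
def map_nodes (pairs : List (String × String)) : List (Int × String × String) :=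
  (PySem.List.enumerate pairs 0).foldl
    (fun node_map p =>
      let udp_node := p.1 * 2 + 1
      let tcp_node := p.1 * 2 + 2
      node_map ++ [(udp_node, "udp", p.2.1)] ++ [(tcp_node, "tcp", p.2.2)]) []

-- ===== PORT B =====
def mapNodesGo (rest : List (String × String)) (n : Int) : List (Int × String × String) :=
  match rest with
  | [] => []
  | (udp_file, tcp_file) :: rest2 =>
      [(n, "udp", udp_file), (n + 1, "tcp", tcp_file)] ++ mapNodesGo rest2 (n + 2)

def map_nodes_alt (pairs : List (String × String)) : List (Int × String × String) :=
  mapNodesGo pairs 1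

-- ===== PRECONDITION & SPEC =====
def Spec_map_nodes (pairs : List (String × String)) (out : List (Int × String × String)) : Prop := out = map_nodes_alt pairs
instance (pairs : List (String × String)) (out : List (Int × String × String)) : Decidable (Spec_map_nodes pairs out) := by unfold Spec_map_nodes; infer_instance

-- ===== CLAIM (what is proved, stated in full; the proofs are below) =====
def Claim_equal_map_nodes : Prop := ∀ (pairs : List (String × String)), Dom_map_nodes pairs → Spec_map_nodes pairs (map_nodes pairs)

-- ===== LEMMAS AND PROOFS =====

theorem pv_a_flatMap (pairs : List (String × String)) :
    map_nodes pairs =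
      (PySem.List.enumerate pairs 0).flatMap
        (fun p => [(p.1 * 2 + 1, "udp", p.2.1), (p.1 * 2 + 2, "tcp", p.2.2)]) := by
  unfold map_nodes
  rw [show (fun (node_map : List (Int × String × String)) (p : Int × String × String) =>
      let udp_node := p.1 * 2 + 1
      let tcp_node := p.1 * 2 + 2
      node_map ++ [(udp_node, "udp", p.2.1)] ++ [(tcp_node, "tcp", p.2.2)]) =
    (fun node_map p => node_map ++ [(p.1 * 2 + 1, "udp", p.2.1), (p.1 * 2 + 2, "tcp", p.2.2)])
    from by funext a p; simp]
  simpa using PySem.List.foldl_append_eq_flatMap _ _ []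

theorem pv_key (pairs : List (String × String)) (n : Int) :
    mapNodesGo pairs (2 * n + 1) =
      (PySem.List.enumerate pairs n).flatMap
        (fun p => [(p.1 * 2 + 1, "udp", p.2.1), (p.1 * 2 + 2, "tcp", p.2.2)]) := by
  induction pairs generalizing n with
  | nil => simp [mapNodesGo, PySem.List.enumerate]
  | cons hd tl ih =>
    obtain ⟨u, t⟩ := hd
    simp only [mapNodesGo, PySem.List.enumerate_cons, List.flatMap_cons]
    have h2 : 2 * n + 1 + 2 = 2 * (n + 1) + 1 := by ring
    rw [h2, ih (n + 1), show 2 * n + 1 = n * 2 + 1 from by ring,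
      show n * 2 + 1 + 1 = n * 2 + 2 from by ring]

-- ===== VERDICT (by name: the statement is the Claim_ definition above) =====
theorem map_nodes_spec : Claim_equal_map_nodes := by
  intro pairs _
  show map_nodes pairs = map_nodes_alt pairs
  rw [pv_a_flatMap]
  unfold map_nodes_alt
  have h := pv_key pairs 0
  simp only [show (2 : Int) * 0 + 1 = 1 from by ring] at h
  exact h.symm
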